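-- pv_equiv track=rewrite | github.com/AdamZhouSE/pythonHomework | Code/CodeRecords/2872/60797/288001.py | find
-- ===== SOURCE A (Python) =====
-- def find(n, data):
--     if n == 1:
--         return 0
--     re = 0
--     i = 0
--     while i < len(data)-1:
--         while data[i]==data[i+1]:
--             data.pop(i+1)
--             re += 1
--         i += 1
--     return re
-- ===== SOURCE B (Python) =====
-- def find(n, data):
--     if n == 1:
--         return 0
--     return sum(1 for x, y in zip(data, data[1:]) if x == y)
-- ===== Notes on version B (the rewrite author's own statement) =====
-- stated objective: faster
-- what changed: replaces the nested while loops that repeatedly pop duplicates out of the list with a single zip pass counting adjacent equal pairs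
import Mathlib
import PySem

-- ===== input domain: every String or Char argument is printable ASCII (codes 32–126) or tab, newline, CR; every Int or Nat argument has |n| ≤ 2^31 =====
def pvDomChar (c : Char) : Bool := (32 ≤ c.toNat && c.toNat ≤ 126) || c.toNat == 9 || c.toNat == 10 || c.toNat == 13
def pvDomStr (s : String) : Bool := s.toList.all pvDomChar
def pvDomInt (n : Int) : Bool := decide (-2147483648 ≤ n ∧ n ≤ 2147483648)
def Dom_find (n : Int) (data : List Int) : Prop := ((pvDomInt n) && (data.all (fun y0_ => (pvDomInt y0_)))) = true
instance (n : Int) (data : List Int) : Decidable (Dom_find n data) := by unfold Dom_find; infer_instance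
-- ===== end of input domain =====

-- B replaces A's nested pop-based while loops with one linear pass counting adjacent equal
-- pairs (asymptotically faster).  A mutates `data` in place (pops duplicates); B does not:
-- the equivalence proved here is about the RETURN value only.

-- ===== PORT A =====
-- inner `while data[i]==data[i+1]: data.pop(i+1); re += 1`, acting on the suffix after
-- position i; `none` = the IndexError Python raises when i+1 runs past the end.
def findInner (x : Int) (l : List Int) (re : Int) : Option (List Int × Int) :=
  match l with
  | [] => none
  | y :: t => if x = y then findInner x t (re + 1) else some (y :: t, re)

-- a pop can only shorten the suffix (termination fact the outer loop's recursion cites)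
theorem findInner_length (x : Int) :
    ∀ (l : List Int) (re : Int) (r' : List Int) (re' : Int),
      findInner x l re = some (r', re') → r'.length ≤ l.length := by
  intro l
  induction l with
  | nil => intro re r' re' h; simp [findInner] at h
  | cons y t ih =>
    intro re r' re' h
    by_cases hx : x = y
    · rw [findInner, if_pos hx] at h
      exact Nat.le_succ_of_le (ih _ _ _ h)
    · rw [findInner, if_neg hx] at h
      cases h; simp

-- outer `while i < len(data)-1`: the elements before position i never change, so the state
-- is the suffix from i on; the loop runs while that suffix has ≥ 2 elements.
def findGo (l : List Int) (re : Int) : Option Int :=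
  match h : l with
  | x :: y :: rest =>
    match hi : findInner x (y :: rest) re with
    | none => none
    | some (r', re') => findGo r' re'
  | _ => some re
termination_by l.length
decreasing_by
  have := findInner_length x (y :: rest) re r' re' hi
  simp only [List.length_cons] at this ⊢
  omega

def find (n : Int) (data : List Int) : Int :=
  if n = 1 then 0
  else (findGo data 0).getD 0   -- `none` (IndexError) never occurs inside Pre_find

-- ===== PORT B =====
-- sum(1 for x, y in zip(data, data[1:]) if x == y)
def find_alt (n : Int) (data : List Int) : Int :=
  if n = 1 then 0
  else (data.zip data.tail).foldl (fun acc p => if p.1 = p.2 then acc + 1 else acc) 0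

-- ===== PRECONDITION & SPEC =====
-- closed-form shape check: the last two elements of the list differ (or it has < 2 elements)
def diffLast : List Int → Bool
  | [] => true
  | [_] => true
  | [a, b] => a != b
  | _ :: b :: c :: t => diffLast (b :: c :: t)

-- Pre_ excludes exactly the inputs on which A raises IndexError: n ≠ 1 and the list ends in
-- two equal elements (the inner while pops past the end of the list there).
def Pre_find (n : Int) (data : List Int) : Prop := n = 1 ∨ diffLast data = true
instance (n : Int) (data : List Int) : Decidable (Pre_find n data) := by
  unfold Pre_find; infer_instance

def pvWitness_find : Int × List Int := (2, [1, 1, 2, 2, 3])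

def Spec_find (n : Int) (data : List Int) (out : Int) : Prop := out = find_alt n data
instance (n : Int) (data : List Int) (out : Int) : Decidable (Spec_find n data out) := by
  unfold Spec_find; infer_instance

-- ===== CLAIM (what is proved, stated in full; the proofs are below) =====
def Claim_equal_find : Prop := ∀ (n : Int) (data : List Int), Dom_find n data → Pre_find n data → Spec_find n data (find n data)

-- ===== LEMMAS AND PROOFS =====

theorem findGo_nil (re : Int) : findGo [] re = some re := by rw [findGo.eq_def]

theorem findGo_one (re a : Int) : findGo [a] re = some re := by rw [findGo.eq_def]

theorem findGo_cons_some (x y : Int) (rest : List Int) (re : Int) (r' : List Int) (re' : Int)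
    (h : findInner x (y :: rest) re = some (r', re')) :
    findGo (x :: y :: rest) re = findGo r' re' := by
  rw [findGo.eq_def]
  split
  · rename_i heq
    obtain ⟨rfl, rfl, rfl⟩ := heq
    split
    · rename_i hi; rw [h] at hi; cases hi
    · rename_i a b hi; rw [h] at hi; cases hi; rfl
  · rename_i hcontra
    exact absurd rfl (hcontra x y rest)

-- the number of adjacent equal pairs, the common value of both ports
def cnt : List Int → Int
  | x :: y :: t => (if x = y then 1 else 0) + cnt (y :: t)
  | _ => 0

theorem foldAdj (l : List Int) :
    ∀ acc : Int,
      (l.zip l.tail).foldl (fun acc p => if p.1 = p.2 then acc + 1 else acc) acc = acc + cnt l := by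
  induction l with
  | nil => intro acc; simp [cnt]
  | cons x t ih =>
    intro acc
    cases t with
    | nil => simp [cnt]
    | cons y t' =>
      simp only [List.tail_cons, List.zip_cons_cons, List.foldl_cons]
      simp only [List.tail_cons] at ih
      rw [ih]
      by_cases h : x = y <;> simp [cnt, h] <;> ring

theorem inner_ok :
    ∀ (l : List Int) (x re : Int), l ≠ [] → diffLast (x :: l) = true →
      ∃ r' re', findInner x l re = some (r', re') ∧ r'.length < (x :: l).length ∧
        re' + cnt r' = re + cnt (x :: l) ∧ diffLast r' = true := by
  intro l
  induction l with
  | nil => intro x re h; exact absurd rfl h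
  | cons y t ih =>
    intro x re _ hd
    by_cases hx : x = y
    · cases t with
      | nil =>
        subst hx
        simp [diffLast] at hd
      | cons c t' =>
        have hd' : diffLast (x :: c :: t') = true := by
          subst hx; simpa [diffLast] using hd
        obtain ⟨r', re', hi, hlen, hcnt, hdl⟩ := ih x (re + 1) (by simp) hd'
        refine ⟨r', re', by simpa [findInner, hx] using hi, ?_, ?_, hdl⟩
        · simp at hlen ⊢; omega
        · have : cnt (x :: y :: c :: t') = 1 + cnt (x :: c :: t') := by
            subst hx; simp [cnt]
          rw [this]; omega
    · refine ⟨y :: t, re, by simp [findInner, hx], by simp, ?_, ?_⟩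
      · simp [cnt, hx]
      · cases t with
        | nil => simp [diffLast]
        | cons c t' => simpa [diffLast] using hd

theorem go_cnt :
    ∀ (N : Nat) (l : List Int), l.length ≤ N → ∀ re : Int, diffLast l = true →
      findGo l re = some (re + cnt l) := by
  intro N
  induction N with
  | zero =>
    intro l hl re _
    have : l = [] := List.eq_nil_of_length_eq_zero (Nat.le_zero.mp hl)
    subst this; simp [findGo_nil, cnt]
  | succ N ih =>
    intro l hl re hd
    match l with
    | [] => simp [findGo_nil, cnt]
    | [a] => simp [findGo_one, cnt]
    | x :: y :: rest =>
      obtain ⟨r', re', hi, hlen, hcnt, hdl⟩ := inner_ok (y :: rest) x re (by simp) hd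
      rw [findGo_cons_some x y rest re r' re' hi]
      have hr : r'.length ≤ N := by simp at hlen hl; omega
      rw [ih r' hr re' hdl, hcnt]

theorem find_spec : Claim_equal_find := by
  intro n data _ hpre
  unfold Spec_find find find_alt
  by_cases hn : n = 1
  · simp [hn]
  · rcases hpre with h1 | hd
    · exact absurd h1 hn
    · simp only [hn, if_false]
      rw [go_cnt data.length data le_rfl 0 hd, foldAdj]
      simp
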